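-- pv_equiv track=rewrite | github.com/liuzhi136/recsys | recommenderSys/datapreprocessing/dataprocess.py | calculateRateInLocation
-- ===== SOURCE A (Python) =====
-- def calculateRateInLocation(location_merchants, originalData):
--     location_mers_rate = dict();
-- #     for k,v in location_merchants.items():
-- #         location_mers_rate[k] = dict()
-- #         for merchant in v:
-- #             location_mers_rate[k][merchant] = 0
--     for record in originalData:
--         if not record[2] in location_mers_rate:
--             location_mers_rate[record[2]] = dict()
--         if not record[1] in location_mers_rate[record[2]]:
--             location_mers_rate[record[2]][record[1]] = 0
--         location_mers_rate[record[2]][record[1]] += 1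
--     return location_mers_rate
-- ===== SOURCE B (Python) =====
-- def calculateRateInLocation(location_merchants, originalData):
--     # group-by decomposition: distinct locations first, then count merchants per location
--     locations = dict.fromkeys(record[2] for record in originalData)
--     location_mers_rate = {}
--     for loc in locations:
--         counts = {}
--         for record in originalData:
--             if record[2] == loc:
--                 counts[record[1]] = counts.get(record[1], 0) + 1
--         location_mers_rate[loc] = counts
--     return location_mers_rate
-- ===== Notes on version B (the rewrite author's own statement) =====
-- stated objective: alternative
-- what changed: A builds the nested dict in one incremental pass (create-if-missing then increment per record); B decomposes the task into a group-by: it first collects the distinct locations in first-occurrence order, then runs a separate merchant-counting pass over the data for each location.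
import Mathlib
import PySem

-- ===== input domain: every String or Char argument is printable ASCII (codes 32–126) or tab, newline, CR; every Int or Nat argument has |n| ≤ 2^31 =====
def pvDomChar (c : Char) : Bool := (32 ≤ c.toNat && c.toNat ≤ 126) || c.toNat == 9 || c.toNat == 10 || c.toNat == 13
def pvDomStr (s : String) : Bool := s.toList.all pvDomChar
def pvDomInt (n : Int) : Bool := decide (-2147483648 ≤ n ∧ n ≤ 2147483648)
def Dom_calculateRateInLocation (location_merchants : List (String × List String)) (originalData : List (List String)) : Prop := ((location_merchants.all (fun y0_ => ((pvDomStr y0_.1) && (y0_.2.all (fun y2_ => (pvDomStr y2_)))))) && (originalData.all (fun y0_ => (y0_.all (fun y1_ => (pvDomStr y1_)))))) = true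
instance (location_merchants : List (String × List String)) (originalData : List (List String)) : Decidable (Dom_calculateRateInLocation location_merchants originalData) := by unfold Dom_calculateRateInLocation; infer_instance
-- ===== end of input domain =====

-- B replaces A's single-pass nested-dict increment loop by a group-by decomposition
-- (distinct locations first, then a counting pass per location): objective 'alternative'.


-- ===== PORT A =====
-- loop body of A; record[2] / record[1] via pyGet? (none = IndexError, excluded by Pre_)
def pvAStep (d : PySem.Dict String (PySem.Dict String Int)) (record : List String) :
    PySem.Dict String (PySem.Dict String Int) :=
  match PySem.List.pyGet? record 2, PySem.List.pyGet? record 1 with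
  | some loc, some mer =>
      let d := if d.contains loc then d else d.insert loc PySem.Dict.empty
      let inner := d.getD loc PySem.Dict.empty
      let inner := if inner.contains mer then inner else inner.insert mer (0 : Int)
      let inner := inner.insert mer (inner.getD mer 0 + 1)
      d.insert loc inner
  | _, _ => d  -- unreachable under Pre_ (Python raises IndexError here)

def calculateRateInLocation (location_merchants : List (String × List String)) (originalData : List (List String)) : List (String × List (String × Int)) :=
  (originalData.foldl pvAStep PySem.Dict.empty).items.map (fun p => (p.1, p.2.items))

-- ===== PORT B =====
def pvLoc (record : List String) : String := (PySem.List.pyGet? record 2).getD ""  -- record[2]; default unreachable under Pre_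
def pvMer (record : List String) : String := (PySem.List.pyGet? record 1).getD ""  -- record[1]; default unreachable under Pre_

def calculateRateInLocation_alt (location_merchants : List (String × List String)) (originalData : List (List String)) : List (String × List (String × Int)) :=
  let locations := PySem.List.dedup (originalData.map pvLoc)
  let res := locations.foldl (fun res loc =>
      let counts := originalData.foldl (fun counts record =>
          if pvLoc record == loc then
            counts.insert (pvMer record) (counts.getD (pvMer record) 0 + 1)
          else counts) PySem.Dict.empty
      res.insert loc counts) PySem.Dict.empty
  res.items.map (fun p => (p.1, p.2.items))

-- ===== PRECONDITION & SPEC =====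
-- Pre_ excludes exactly the inputs where A raises IndexError: a record shorter than 3 fields.
def Pre_calculateRateInLocation (location_merchants : List (String × List String)) (originalData : List (List String)) : Prop :=
  ∀ r ∈ originalData, 3 ≤ r.length
instance (location_merchants : List (String × List String)) (originalData : List (List String)) : Decidable (Pre_calculateRateInLocation location_merchants originalData) := by unfold Pre_calculateRateInLocation; infer_instance
def pvWitness_calculateRateInLocation : (List (String × List String)) × List (List String) :=
  ([("a", ["m"])], [["u1", "m1", "l1"], ["u2", "m2", "l1"], ["u3", "m1", "l1"]])
def Spec_calculateRateInLocation (location_merchants : List (String × List String)) (originalData : List (List String)) (out : List (String × List (String × Int))) : Prop := out = calculateRateInLocation_alt location_merchants originalData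
instance (location_merchants : List (String × List String)) (originalData : List (List String)) (out : List (String × List (String × Int))) : Decidable (Spec_calculateRateInLocation location_merchants originalData out) := by unfold Spec_calculateRateInLocation; infer_instance

-- ===== CLAIM =====
def Claim_equal_calculateRateInLocation : Prop := ∀ (location_merchants : List (String × List String)) (originalData : List (List String)), Dom_calculateRateInLocation location_merchants originalData → Pre_calculateRateInLocation location_merchants originalData → Spec_calculateRateInLocation location_merchants originalData (calculateRateInLocation location_merchants originalData)

-- ===== LEMMAS AND PROOFS =====

def pvPStep (d : PySem.Dict String (PySem.Dict String Int)) (p : String × String) :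
    PySem.Dict String (PySem.Dict String Int) :=
  let d1 := if d.contains p.1 then d else d.insert p.1 PySem.Dict.empty
  d1.insert p.1 ((d1.getD p.1 PySem.Dict.empty).insert p.2
      ((d1.getD p.1 PySem.Dict.empty).getD p.2 0 + 1))
def pvKey (record : List String) : String × String := (pvLoc record, pvMer record)
lemma pvGet2 (r : List String) (h : 3 ≤ r.length) : PySem.List.pyGet? r 2 = some (pvLoc r) := by
  have h2 := PySem.List.pyGet?_ofNat r 2 (by omega)
  have h3 : ((2:ℕ) : Int) = (2 : Int) := by norm_num
  rw [h3] at h2; simp [pvLoc, h2]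
lemma pvGet1 (r : List String) (h : 3 ≤ r.length) : PySem.List.pyGet? r 1 = some (pvMer r) := by
  have h2 := PySem.List.pyGet?_ofNat r 1 (by omega)
  have h3 : ((1:ℕ) : Int) = (1 : Int) := by norm_num
  rw [h3] at h2; simp [pvMer, h2]
lemma pvAStep_eq (d : PySem.Dict String (PySem.Dict String Int)) (r : List String)
    (h : 3 ≤ r.length) : pvAStep d r = pvPStep d (pvKey r) := by
  simp only [pvAStep, pvGet2 r h, pvGet1 r h, pvPStep, pvKey]
  set d1 := if d.contains (pvLoc r) then d else d.insert (pvLoc r) PySem.Dict.empty with hd1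
  by_cases hm : (d1.getD (pvLoc r) PySem.Dict.empty).contains (pvMer r)
  · simp [hm]
  · rw [PySem.Dict.getD_of_not_contains _ _ (Bool.eq_false_iff.mpr hm)] at *
    simp [hm, PySem.Dict.insert_insert_self]

def pvBC (ms : List String) : PySem.Dict String Int :=
  ms.foldl (fun c m => c.insert m (c.getD m 0 + 1)) PySem.Dict.empty

lemma pvBC_append (ms : List String) (m : String) :
    pvBC (ms ++ [m]) = (pvBC ms).insert m ((pvBC ms).getD m 0 + 1) := by
  simp [pvBC, List.foldl_append]

lemma pvKeysMk (G : String → PySem.Dict String Int) (L : List String) :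
    (PySem.Dict.mk (L.map (fun loc => (loc, G loc)))).keys = L := by
  simp [PySem.Dict.keys_mk, List.map_map, Function.comp_def]

lemma pvMain (ps : List (String × String)) :
    ps.foldl pvPStep PySem.Dict.empty =
      PySem.Dict.mk ((PySem.List.dedup (ps.map Prod.fst)).map
        (fun loc => (loc, pvBC ((ps.filter (fun q => q.1 == loc)).map Prod.snd)))) := by
  induction ps using List.reverseRecOn with
  | nil => rfl
  | append_singleton ps p ih =>
    obtain ⟨l, m⟩ := p
    rw [List.foldl_append, List.foldl_cons, List.foldl_nil, ih]
    have hded : PySem.List.dedup ((ps ++ [(l, m)]).map Prod.fst)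
        = PySem.Set.add (PySem.List.dedup (ps.map Prod.fst)) l := by
      simp [PySem.List.dedup, PySem.Set.ofList, List.foldl_append]
    rw [hded]
    set L := PySem.List.dedup (ps.map Prod.fst) with hL
    have hLnodup : L.Nodup := PySem.Set.nodup_ofList _
    have hmemL : ∀ x, x ∈ L ↔ x ∈ ps.map Prod.fst := fun x => PySem.Set.mem_ofList _ x
    have hfil : ∀ loc, (ps ++ [(l, m)]).filter (fun q => q.1 == loc)
        = ps.filter (fun q => q.1 == loc) ++ if l = loc then [(l, m)] else [] := by
      intro loc; rw [List.filter_append]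
      congr 1
      by_cases h : l = loc
      · simp [List.filter, h]
      · have hb : (l == loc) = false := beq_eq_false_iff_ne.mpr h
        simp [List.filter, hb, h]
    by_cases hmem : l ∈ ps.map Prod.fst
    · -- location already seen
      have hlL : l ∈ L := (hmemL l).mpr hmem
      have hadd : PySem.Set.add L l = L := by
        simp [PySem.Set.add, List.elem_eq_contains] at *
        simp [hlL]
      have hkeys : (PySem.Dict.mk (L.map (fun loc =>
          (loc, pvBC ((ps.filter (fun q => q.1 == loc)).map Prod.snd))))).keys = L :=
        pvKeysMk _ L
      have hcont : (PySem.Dict.mk (L.map (fun loc =>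
          (loc, pvBC ((ps.filter (fun q => q.1 == loc)).map Prod.snd))))).contains l = true := by
        rw [PySem.Dict.contains_eq_decide_mem_keys, hkeys]; simp [hlL]
      have hgetD : (PySem.Dict.mk (L.map (fun loc =>
          (loc, pvBC ((ps.filter (fun q => q.1 == loc)).map Prod.snd))))).getD l PySem.Dict.empty
          = pvBC ((ps.filter (fun q => q.1 == l)).map Prod.snd) := by
        apply PySem.Dict.getD_of_mem_items
        · exact List.mem_map_of_mem hlL
        · rw [hkeys]; exact hLnodup
      unfold pvPStep
      simp only [hcont, if_true, hgetD]
      apply PySem.Dict.ext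
      rw [PySem.Dict.items_insert_of_contains _ _ hcont]
      show (L.map _).map _ = (PySem.Set.add L l).map _
      rw [hadd, List.map_map]
      apply List.map_congr_left
      intro loc hloc
      by_cases hll : loc = l
      · subst hll
        simp only [Function.comp_apply, beq_self_eq_true, if_true, hfil loc, if_pos rfl,
          List.map_append]
        simp [pvBC_append]
      · have hb : (loc == l) = false := beq_eq_false_iff_ne.mpr hll
        simp only [Function.comp_apply, hb, Bool.false_eq_true, if_false,
          hfil loc, if_neg (fun h => hll (Eq.symm h)), List.append_nil]
    · -- fresh location
      have hlL : l ∉ L := fun h => hmem ((hmemL l).mp h)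
      have hadd : PySem.Set.add L l = L ++ [l] := by
        simp [PySem.Set.add, List.elem_eq_contains] at *
        simp [hlL]
      have hkeys : (PySem.Dict.mk (L.map (fun loc =>
          (loc, pvBC ((ps.filter (fun q => q.1 == loc)).map Prod.snd))))).keys = L :=
        pvKeysMk _ L
      have hcont : (PySem.Dict.mk (L.map (fun loc =>
          (loc, pvBC ((ps.filter (fun q => q.1 == loc)).map Prod.snd))))).contains l = false := by
        rw [PySem.Dict.contains_eq_decide_mem_keys, hkeys]; simp [hlL]
      have hnil : ps.filter (fun q => q.1 == l) = [] := by
        rw [List.filter_eq_nil_iff]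
        intro q hq hb
        exact hmem (by
          have : q.1 ∈ ps.map Prod.fst := List.mem_map_of_mem hq
          rwa [eq_of_beq hb] at this)
      unfold pvPStep
      simp only [hcont, Bool.false_eq_true, if_false, PySem.Dict.getD_insert_self]
      rw [PySem.Dict.insert_insert_self]
      apply PySem.Dict.ext
      rw [PySem.Dict.items_insert_of_not_contains _ _ hcont]
      show (L.map _) ++ [_] = (PySem.Set.add L l).map _
      rw [hadd, List.map_append, List.map_singleton]
      congr 1
      · apply List.map_congr_left
        intro loc hloc
        have hll : ¬ l = loc := fun h => hlL (h ▸ hloc)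
        simp only [hfil loc, if_neg hll, List.append_nil]
      · simp only [hfil l, if_pos rfl, hnil, List.nil_append, List.map_cons, List.map_nil]
        simp [pvBC, PySem.Dict.getD_empty]

lemma pvAFold (od : List (List String)) (d : PySem.Dict String (PySem.Dict String Int))
    (h : ∀ r ∈ od, 3 ≤ r.length) :
    od.foldl pvAStep d = (od.map pvKey).foldl pvPStep d := by
  induction od generalizing d with
  | nil => rfl
  | cons r od ih =>
    rw [List.map_cons, List.foldl_cons, List.foldl_cons,
      pvAStep_eq d r (h r (List.mem_cons_self))]
    exact ih _ (fun r hr => h r (List.mem_cons_of_mem _ hr))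

lemma pvBInner (od : List (List String)) (loc : String) :
    od.foldl (fun counts record =>
        if pvLoc record == loc then
          counts.insert (pvMer record) (counts.getD (pvMer record) 0 + 1)
        else counts) PySem.Dict.empty
      = pvBC (((od.map pvKey).filter (fun q => q.1 == loc)).map Prod.snd) := by
  simp only [pvBC, List.foldl_map, List.foldl_filter]
  rfl

lemma pvFreshFold (L : List String) (hN : L.Nodup) (C : String → PySem.Dict String Int) :
    (L.foldl (fun res loc => res.insert loc (C loc)) PySem.Dict.empty).items
      = L.map (fun loc => (loc, C loc)) := by
  rw [PySem.Dict.items_foldl_insert_fresh L (fun a => a) C PySem.Dict.empty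
      (fun a _ => PySem.Dict.contains_empty a) (by simpa using hN)]
  rfl


-- ===== VERDICT =====
theorem calculateRateInLocation_spec : Claim_equal_calculateRateInLocation := by
  intro location_merchants originalData hdom hpre
  unfold Spec_calculateRateInLocation
  have hpre' : ∀ r ∈ originalData, 3 ≤ r.length := hpre
  unfold calculateRateInLocation calculateRateInLocation_alt
  have hmaps' : PySem.List.dedup ((originalData.map pvKey).map Prod.fst)
      = PySem.List.dedup (originalData.map pvLoc) := by
    congr 1
    simp only [List.map_map]; exact List.map_congr_left (fun a _ => rfl)
  have hnd : (PySem.List.dedup (originalData.map pvLoc)).Nodup := by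
    simpa using PySem.Set.nodup_ofList (originalData.map pvLoc)
  dsimp only
  rw [pvAFold _ _ hpre', pvMain, pvFreshFold _ hnd]
  rw [hmaps']
  congr 1
  apply List.map_congr_left
  intro loc _
  rw [pvBInner]
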